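-- pv_equiv track=rewrite | github.com/Hooneybadger/jump-rope-detector | fsm/basic_jump/jump_rope_pipeline.py | _sanitize_path_fragment
-- ===== SOURCE A (Python) =====
-- def _sanitize_path_fragment(text):
--     if text is None:
--         return ""
--     cleaned = "".join(
--         ch if (ch.isascii() and (ch.isalnum() or ch in {"-", "_", "."})) else "_"
--         for ch in str(text).strip()
--     )
--     return cleaned.strip("._-")
-- ===== SOURCE B (Python) =====
-- def _sanitize_path_fragment(text):
--     if text is None:
--         return ""
--     s = list(str(text).strip())
--
--     def keep(ch):
--         return ch.isascii() and ch.isalnum()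
--
--     # Trim both ends down to the first/last ASCII alphanumeric BEFORE mapping:
--     # every char that A's final strip of dots/underscores/hyphens would remove is exactly a
--     # non-(ASCII-alnum) char here, since disallowed chars map to '_'.
--     while s and not keep(s[0]):
--         s.pop(0)
--     while s and not keep(s[-1]):
--         s.pop()
--
--     return "".join(
--         ch if (ch.isascii() and (ch.isalnum() or ch in "-_.")) else "_"
--         for ch in s
--     )
-- ===== Notes on version B (the rewrite author's own statement) =====
-- stated objective: alternative
-- what changed: Instead of mapping every character to its sanitized form and then stripping dots/underscores/hyphens from the result, B first trims the stripped input down to its first/last ASCII-alphanumeric character and only then maps the core, so the final strip pass over the sanitized output disappears.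
import Mathlib
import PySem

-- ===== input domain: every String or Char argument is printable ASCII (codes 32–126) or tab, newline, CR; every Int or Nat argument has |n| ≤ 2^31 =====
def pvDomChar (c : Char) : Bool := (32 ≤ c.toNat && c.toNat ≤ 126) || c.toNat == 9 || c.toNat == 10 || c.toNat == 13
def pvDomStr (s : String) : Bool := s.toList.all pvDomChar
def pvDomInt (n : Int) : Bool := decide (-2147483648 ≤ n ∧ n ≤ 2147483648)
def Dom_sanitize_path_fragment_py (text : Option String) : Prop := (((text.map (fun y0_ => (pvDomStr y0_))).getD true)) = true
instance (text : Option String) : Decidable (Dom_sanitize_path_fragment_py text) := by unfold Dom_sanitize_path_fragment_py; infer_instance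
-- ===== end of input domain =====

-- B trims the stripped input down to its first/last ASCII-alphanumeric character before mapping,
-- instead of A's map-every-character-then-strip of dots/underscores/hyphens; alternative decomposition, same cost.

-- ===== PORT A =====
-- ch.isascii() and (ch.isalnum() or ch in {"-", "_", "."})
def pvAllowedA (c : Char) : Bool :=
  decide (c.toNat ≤ 127) && (PySem.Chars.isalnum c || ['-', '_', '.'].contains c)

def sanitize_path_fragment_py (text : Option String) : String :=
  match text with
  | none => ""
  | some t =>
      let cleaned := (PySem.Chars.strip t.toList).map (fun ch => if pvAllowedA ch then ch else '_')
      String.ofList (PySem.Chars.stripChars cleaned ['.', '_', '-'])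

-- ===== PORT B =====
-- keep(ch) = ch.isascii() and ch.isalnum()
def pvKeepB (c : Char) : Bool := decide (c.toNat ≤ 127) && PySem.Chars.isalnum c

def sanitize_path_fragment_py_alt (text : Option String) : String :=
  match text with
  | none => ""
  | some t =>
      let s := PySem.Chars.strip t.toList
      -- "while s and not keep(s[0]): s.pop(0)" drops non-keep chars from the front
      let l := s.dropWhile (fun c => !pvKeepB c)
      -- "while s and not keep(s[-1]): s.pop()" drops non-keep chars from the back
      let core := (l.reverse.dropWhile (fun c => !pvKeepB c)).reverse
      String.ofList (core.map (fun ch => if pvAllowedA ch then ch else '_'))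

-- ===== PRECONDITION & SPEC =====
def Spec_sanitize_path_fragment_py (text : Option String) (out : String) : Prop := out = sanitize_path_fragment_py_alt text
instance (text : Option String) (out : String) : Decidable (Spec_sanitize_path_fragment_py text out) := by unfold Spec_sanitize_path_fragment_py; infer_instance

-- ===== CLAIM (what is proved, stated in full; the proofs are below) =====
def Claim_equal_sanitize_path_fragment_py : Prop := ∀ (text : Option String), Dom_sanitize_path_fragment_py text → Spec_sanitize_path_fragment_py text (sanitize_path_fragment_py text)

-- ===== LEMMAS AND PROOFS =====

-- A sanitized character lies in A's strip set {'.','_','-'} iff the original char is not ASCII-alnum.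
theorem pv_strip_set_iff (c : Char) :
    ['.', '_', '-'].contains (if pvAllowedA c then c else '_') = !pvKeepB c := by
  by_cases hm : c = '.' ∨ c = '_' ∨ c = '-'
  · rcases hm with rfl | rfl | rfl <;> decide
  · push Not at hm
    obtain ⟨h1, h2, h3⟩ := hm
    have hc : ∀ (l : List Char), c ∈ l → l = ['.','_','-'] ∨ l = ['-','_','.'] → False := by
      intro l hl he
      rcases he with rfl | rfl <;> simp_all
    have hca : (['-','_','.'].contains c) = false := by
      rw [Bool.eq_false_iff]; intro h; exact hc _ (List.mem_of_elem_eq_true h) (Or.inr rfl)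
    have hA : pvAllowedA c = pvKeepB c := by
      unfold pvAllowedA pvKeepB; rw [hca]; simp
    cases hk : pvKeepB c
    · simp [hA, hk]
    · simp [hA, hk, h1, h2, h3]

-- Stripping dots/underscores/hyphens from the sanitized string = sanitizing the substring between the
-- first and last ASCII-alphanumeric characters.
theorem sanitize_core_eq (t : String) :
    PySem.Chars.stripChars
        ((PySem.Chars.strip t.toList).map (fun ch => if pvAllowedA ch then ch else '_'))
        ['.', '_', '-']
      = (((PySem.Chars.strip t.toList).dropWhile (fun c => !pvKeepB c)).reverse.dropWhile
          (fun c => !pvKeepB c)).reverse.map (fun ch => if pvAllowedA ch then ch else '_') := by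
  have hp : ((fun c => (['.', '_', '-'].contains c : Bool)) ∘ (fun ch => if pvAllowedA ch then ch else '_'))
      = fun c => !pvKeepB c := by
    funext c; exact pv_strip_set_iff c
  simp only [PySem.Chars.stripChars, List.dropWhile_map, hp, ← List.map_reverse]

-- ===== VERDICT (by name: the statement is the Claim_ definition above) =====
theorem sanitize_path_fragment_py_spec : Claim_equal_sanitize_path_fragment_py := by
  intro text _
  unfold Spec_sanitize_path_fragment_py sanitize_path_fragment_py sanitize_path_fragment_py_alt
  cases text with
  | none => rfl
  | some t =>
      simp only
      rw [sanitize_core_eq t]
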